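-- pv_equiv track=rewrite | github.com/GeeteshPaidi/TypingSpeedTest | typespeed.py | type_mistakes
-- ===== SOURCE A (Python) =====
-- def type_mistakes(question , answer):
--     mistakes = 0
--     question_words = question.split(" ")
--     answer_words = answer.split(" ")
--     for i in range(len(question_words)):
--         try:
--             if question_words[i] != answer_words[i]:
--                 mistakes += 1
--         except:     #if some error like IndexError occurs
--             mistakes += 1
--     return mistakes
-- ===== SOURCE B (Python) =====
-- def type_mistakes(question, answer):
--     # Complementary counting: every question word is a mistake unless it is
--     # matched by the answer word at the same position, so the result is
--     # (total question words) - (number of matching aligned pairs).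
--     question_words = question.split(" ")
--     matches = sum(q == a for q, a in zip(question_words, answer.split(" ")))
--     return len(question_words) - matches
-- ===== Notes on version B (the rewrite author's own statement) =====
-- stated objective: simpler
-- what changed: Complementary counting: instead of A's indexed loop that counts mismatches and catches IndexError for missing answer words, B counts the aligned pairs that MATCH and returns len(question_words) minus that count, which accounts for surplus question words with no extra case.
import Mathlib
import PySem

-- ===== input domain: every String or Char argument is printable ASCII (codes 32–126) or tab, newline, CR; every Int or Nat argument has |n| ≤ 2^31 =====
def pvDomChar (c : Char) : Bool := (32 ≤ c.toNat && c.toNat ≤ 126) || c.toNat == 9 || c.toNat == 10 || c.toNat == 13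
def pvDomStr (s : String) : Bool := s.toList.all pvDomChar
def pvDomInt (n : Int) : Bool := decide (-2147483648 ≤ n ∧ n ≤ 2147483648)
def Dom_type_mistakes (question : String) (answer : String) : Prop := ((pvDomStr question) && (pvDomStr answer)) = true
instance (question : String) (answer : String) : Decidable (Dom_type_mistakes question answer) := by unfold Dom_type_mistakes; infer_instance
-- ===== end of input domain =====

-- B counts the aligned MATCHING pairs and returns (total question words) minus that count,
-- replacing A's indexed mismatch loop with try/except; same return value.

-- ===== PORT A =====
-- Literal port: for i in range(len(question_words)): try: compare words; except (IndexError) → mistakes += 1.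
def type_mistakes (question : String) (answer : String) : Int :=
  let question_words := (PySem.Str.split? question " ").getD []
  let answer_words := (PySem.Str.split? answer " ").getD []
  (PySem.List.pyRange 0 question_words.length 1).foldl
    (fun mistakes i =>
      match PySem.List.pyGet? question_words i, PySem.List.pyGet? answer_words i with
      | some qw, some aw => if qw ≠ aw then mistakes + 1 else mistakes
      | _, _ => mistakes + 1) 0

-- ===== PORT B =====
-- matches = sum(q == a for q, a in zip(question_words, answer.split(" "))); len(question_words) - matches
def type_mistakes_alt (question : String) (answer : String) : Int :=
  let question_words := (PySem.Str.split? question " ").getD []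
  let nMatches := (question_words.zip ((PySem.Str.split? answer " ").getD [])).countP
    (fun p => p.1 == p.2)
  (question_words.length : Int) - (nMatches : Int)

-- ===== PRECONDITION & SPEC =====
def Spec_type_mistakes (question : String) (answer : String) (out : Int) : Prop := out = type_mistakes_alt question answer
instance (question : String) (answer : String) (out : Int) : Decidable (Spec_type_mistakes question answer out) := by unfold Spec_type_mistakes; infer_instance

-- ===== CLAIM =====
def Claim_equal_type_mistakes : Prop := ∀ (question : String) (answer : String), Dom_type_mistakes question answer → Spec_type_mistakes question answer (type_mistakes question answer)

-- ===== LEMMAS AND PROOFS =====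

-- the loop body of A's port, on word lists
def pvStep (xs ys : List String) (mistakes : Int) (k : Nat) : Int :=
  match xs[k]?, ys[k]? with
  | some qw, some aw => if qw ≠ aw then mistakes + 1 else mistakes
  | _, _ => mistakes + 1

lemma pvStep_succ (x : String) (xs : List String) (y : String) (ys : List String)
    (m : Int) (k : Nat) : pvStep (x :: xs) (y :: ys) m (k + 1) = pvStep xs ys m k := by
  simp [pvStep]

lemma pvStep_succ_nil (x : String) (xs : List String) (m : Int) (k : Nat) :
    pvStep (x :: xs) [] m (k + 1) = pvStep xs [] m k := by
  simp [pvStep]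

lemma pvLoop_eq (xs : List String) : ∀ (ys : List String) (m : Int),
    (List.range xs.length).foldl (pvStep xs ys) m
      = m + (xs.length : Int)
          - ((xs.zip ys).countP (fun p => p.1 == p.2) : Int) := by
  induction xs with
  | nil => intro ys m; simp
  | cons x xs ih =>
    intro ys m
    simp only [List.length_cons]
    rw [List.range_succ_eq_map, List.foldl_cons, List.foldl_map]
    cases ys with
    | nil =>
      have h : ∀ (init : Int), (List.range xs.length).foldl (fun m k => pvStep (x :: xs) [] m (k + 1)) init
          = (List.range xs.length).foldl (pvStep xs []) init := by
        intro init
        apply PySem.List.foldl_congr_mem; intro m k _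
        exact pvStep_succ_nil x xs m k
      simp only [h, ih]
      simp only [pvStep, List.getElem?_cons_zero, List.getElem?_nil, List.zip_nil_right,
        List.countP_nil, List.length_nil]
      push_cast
      omega
    | cons y ys =>
      have h : ∀ (init : Int), (List.range xs.length).foldl (fun m k => pvStep (x :: xs) (y :: ys) m (k + 1)) init
          = (List.range xs.length).foldl (pvStep xs ys) init := by
        intro init
        apply PySem.List.foldl_congr_mem; intro m k _
        exact pvStep_succ x xs y ys m k
      simp only [h, ih]
      simp only [pvStep, List.getElem?_cons_zero, List.zip_cons_cons, List.countP_cons,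
        List.length_cons]
      by_cases hxy : x = y
      · simp [hxy]; push_cast; ring
      · simp [hxy]; push_cast; ring

lemma pyRange_fold_eq (xs ys : List String) (m : Int) :
    (PySem.List.pyRange 0 (xs.length : Int) 1).foldl
      (fun mistakes i =>
        match PySem.List.pyGet? xs i, PySem.List.pyGet? ys i with
        | some qw, some aw => if qw ≠ aw then mistakes + 1 else mistakes
        | _, _ => mistakes + 1) m
    = (List.range xs.length).foldl (pvStep xs ys) m := by
  rw [PySem.List.pyRange_one, List.foldl_map]
  apply PySem.List.foldl_congr_mem; intro acc k _
  simp [pvStep]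

-- ===== VERDICT =====
theorem type_mistakes_spec : Claim_equal_type_mistakes := by
  intro question answer _
  unfold Spec_type_mistakes type_mistakes type_mistakes_alt
  rw [pyRange_fold_eq, pvLoop_eq]
  ring
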